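-- pv_equiv track=rewrite | github.com/eddiekaung/DICA-Scraper | DICA_scrape.py | address_split
-- ===== SOURCE A (Python) =====
-- def street_find(words):
--     #find only the street name
--     for word in words:
--         if word.lower().find("street") != -1:
--             return word
--         else:
--             pass
--
-- def road_find(words):
--     #find only the road name
--     for word in words:
--         if word.lower().find("road") != -1:
--             return word
--         else:
--             pass
--
-- def address_split(address):
--     words = address.split(sep = ',')
--     street = street_find(words)
--     road = road_find(words)
--     if street == None:
--         street = road
--
--     if street == None:
--         street = ""
--
--     full_address = ''
--     for word in words[:-2]:
--         full_address += word
--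
--
--     location = [street.strip(), words[-2].strip(), words[-1].strip(), full_address]
--     return location
-- ===== SOURCE B (Python) =====
-- def address_split(address):
--     # Search the whole lowered address once; recover the chunk holding the first
--     # "street" (else "road") occurrence by counting commas before the hit position.
--     words = address.split(',')
--     low = address.lower()
--     j = low.find("street")
--     if j == -1:
--         j = low.find("road")
--     street = "" if j == -1 else words[low[:j].count(',')]
--     return [street.strip(), words[-2].strip(), words[-1].strip(),
--             "".join(words[:-2])]
-- ===== Notes on version B (the rewrite author's own statement) =====
-- stated objective: alternative
-- what changed: Instead of scanning comma chunks for substrings, B searches the whole lowered address once with str.find('street')/find('road') and recovers the matching chunk by counting the commas before the hit position (words[low[:j].count(',')]); the prefix concatenation becomes ''.join(words[:-2]).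
import Mathlib
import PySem

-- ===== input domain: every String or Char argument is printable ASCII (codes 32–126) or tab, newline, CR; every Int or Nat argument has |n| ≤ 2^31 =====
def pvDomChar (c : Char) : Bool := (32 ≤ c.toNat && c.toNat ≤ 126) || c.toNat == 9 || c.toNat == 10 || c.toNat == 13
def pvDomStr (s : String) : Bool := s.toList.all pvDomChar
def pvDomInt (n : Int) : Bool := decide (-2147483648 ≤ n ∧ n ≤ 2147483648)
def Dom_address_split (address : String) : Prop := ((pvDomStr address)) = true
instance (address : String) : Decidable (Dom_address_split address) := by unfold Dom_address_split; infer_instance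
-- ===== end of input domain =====

-- B is an alternative algorithm: instead of scanning comma chunks for substrings, it finds
-- "street"/"road" once in the whole lowered address and recovers the matching chunk by
-- counting the commas before the hit position.

-- ===== PORT A =====
def streetFind (words : List String) : Option String :=
  match words with
  | [] => none
  | w :: ws =>
    if PySem.Str.find (PySem.Str.lower w) "street" ≠ -1 then some w
    else streetFind ws

def roadFind (words : List String) : Option String :=
  match words with
  | [] => none
  | w :: ws =>
    if PySem.Str.find (PySem.Str.lower w) "road" ≠ -1 then some w
    else roadFind ws

def address_split (address : String) : List String :=
  let words := (PySem.Str.split? address ",").getD []   -- sep "," ≠ "": split? is some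
  let street := streetFind words
  let road := roadFind words
  let street := match street with
    | none => road
    | some s => some s
  let street := match street with
    | none => ""
    | some s => s
  let full_address :=
    (PySem.List.slice words none (some (-2))).foldl (fun acc w => acc ++ w) ""
  -- words[-2] / words[-1]: Python raises IndexError when absent; excluded by Pre_
  match PySem.List.pyGet? words (-2), PySem.List.pyGet? words (-1) with
  | some w2, some w1 =>
      [PySem.Str.strip street, PySem.Str.strip w2, PySem.Str.strip w1, full_address]
  | _, _ => []

-- ===== PORT B =====
def address_split_alt (address : String) : List String :=
  let words := (PySem.Str.split? address ",").getD []   -- sep "," ≠ "": split? is some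
  let low := PySem.Str.lower address
  let j0 := PySem.Str.find low "street"
  let j := if j0 = -1 then PySem.Str.find low "road" else j0
  -- words[low[:j].count(',')]: the comma count before a hit is provably < len(words),
  -- so this Python index never raises; ported with the in-range getD
  let street := if j = -1 then "" else
    PySem.List.pyGetD words
      ((PySem.Str.count (PySem.Str.slice low none (some j)) "," : Nat) : Int) ""
  match PySem.List.pyGet? words (-2), PySem.List.pyGet? words (-1) with
  | none, _ => []
  | _, none => []
  | some w2, some w1 =>
      [PySem.Str.strip street, PySem.Str.strip w2, PySem.Str.strip w1,
       PySem.Str.join "" (PySem.List.slice words none (some (-2)))]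

-- ===== PRECONDITION & SPEC =====
-- Pre_ excludes addresses containing no comma: the split then has a single part and
-- indexing the second-to-last part raises IndexError in both A and B.
def Pre_address_split (address : String) : Prop :=
  2 ≤ ((PySem.Str.split? address ",").getD []).length
instance (address : String) : Decidable (Pre_address_split address) := by
  unfold Pre_address_split; infer_instance

def pvWitness_address_split : String := "1 Main Street, Yangon"

def Spec_address_split (address : String) (out : List String) : Prop :=
  out = address_split_alt address
instance (address : String) (out : List String) : Decidable (Spec_address_split address out) := by
  unfold Spec_address_split; infer_instance

-- ===== CLAIM (what is proved, stated in full; the proofs are below) =====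
def Claim_equal_address_split : Prop :=
  ∀ (address : String), Dom_address_split address → Pre_address_split address →
    Spec_address_split address (address_split address)

-- ===== LEMMAS AND PROOFS =====

-- proof-side model of str.split(',')
def splitC : List Char → List (List Char)
  | [] => [[]]
  | c :: t => if c = ',' then [] :: splitC t else (c :: (splitC t).headI) :: (splitC t).tail

theorem splitC_ne_nil (t : List Char) : splitC t ≠ [] := by
  cases t with
  | nil => simp [splitC]
  | cons c t => simp only [splitC]; split_ifs <;> simp

theorem headI_splitC (t : List Char) :
    (splitC t).headI = t.takeWhile (· ≠ ',') := by
  induction t with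
  | nil => rfl
  | cons c t ih =>
    simp only [splitC]
    by_cases hc : c = ','
    · subst hc; simp [List.takeWhile]
    · simp [hc, List.takeWhile, ih]

theorem length_splitC (t : List Char) : (splitC t).length = t.count ',' + 1 := by
  induction t with
  | nil => simp [splitC]
  | cons c t ih =>
    simp only [splitC]
    by_cases hc : c = ','
    · subst hc; simp [ih]
    · simp [hc, ih]

theorem splitOn_go_comma (l : List Char) : ∀ (fuel : Nat) (cur : List Char)
    (acc : List (List Char)), l.length < fuel →
    PySem.Chars.splitOn.go [','] fuel l cur acc
      = acc.reverse ++ (cur.reverse ++ (splitC l).headI) :: (splitC l).tail := by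
  induction l with
  | nil =>
    intro fuel cur acc hf
    cases fuel with
    | zero => omega
    | succ f =>
      rw [PySem.Chars.splitOn.go]
      · simp [splitC]
      · omega
  | cons c t ih =>
    intro fuel cur acc hf
    cases fuel with
    | zero => omega
    | succ f =>
      rw [PySem.Chars.splitOn.go]
      rcases hX : splitC t with _ | ⟨h1, tl⟩
      · exact absurd hX (splitC_ne_nil t)
      by_cases hc : c = ','
      · subst hc
        rw [if_pos (by simp [List.isPrefixOf])]
        rw [show List.drop ([','].length) (',' :: t) = t from rfl]
        rw [ih f [] (cur.reverse :: acc) (by simp at hf ⊢; omega), hX]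
        simp [splitC, hX]
      · rw [if_neg (by simp [List.isPrefixOf]; exact fun h => absurd h.symm hc)]
        rw [ih f (c :: cur) acc (by simp at hf ⊢; omega), hX]
        simp [splitC, hc, hX]

theorem splitOn_comma (t : List Char) : PySem.Chars.splitOn t [','] = splitC t := by
  show PySem.Chars.splitOn.go [','] (t.length + 1) t [] [] = splitC t
  rw [splitOn_go_comma t (t.length + 1) [] [] (by omega)]
  rcases hX : splitC t with _ | ⟨h1, tl⟩
  · exact absurd hX (splitC_ne_nil t)
  · simp

theorem find_go_nonneg (sub l : List Char) : ∀ (k : Nat),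
    PySem.Chars.find.go sub l k = -1 ∨ (k : Int) ≤ PySem.Chars.find.go sub l k := by
  induction l with
  | nil =>
    intro k
    rw [PySem.Chars.find.go]
    by_cases h : sub.isEmpty = true
    · right; simp [h]
    · left; simp [h]
  | cons c t ih =>
    intro k
    rw [PySem.Chars.find.go]
    by_cases h : sub.isPrefixOf (c :: t) = true
    · right; simp [h]
    · simp only [h]
      rcases ih (k + 1) with h1 | h1
      · left; exact h1
      · right
        refine le_trans ?_ h1
        push_cast; omega

theorem find_go_shift (sub l : List Char) (k : Nat) :
    PySem.Chars.find.go sub l k =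
      if PySem.Chars.find.go sub l 0 = -1 then -1
      else PySem.Chars.find.go sub l 0 + k := by
  induction l generalizing k with
  | nil =>
    rw [PySem.Chars.find.go, PySem.Chars.find.go]
    by_cases h : sub.isEmpty = true
    · simp [h]
    · simp [h]
  | cons c t ih =>
    rw [PySem.Chars.find.go, PySem.Chars.find.go]
    by_cases h : sub.isPrefixOf (c :: t) = true
    · simp [h]
    · simp only [h]
      rw [ih (k + 1), ih 1]
      rcases find_go_nonneg sub t 0 with h1 | h1
      · simp [h1]
      · have hne : PySem.Chars.find.go sub t 0 ≠ -1 := by omega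
        have hne1 : PySem.Chars.find.go sub t 0 + 1 ≠ -1 := by omega
        simp only [hne, if_false]
        split_ifs <;> omega

theorem find_nil (sub : List Char) (hsub : sub ≠ []) :
    PySem.Chars.find [] sub = -1 := by
  show PySem.Chars.find.go sub [] 0 = -1
  rw [PySem.Chars.find.go]
  simp [List.isEmpty_iff, hsub]

theorem find_cons (sub : List Char) (c : Char) (t : List Char) :
    PySem.Chars.find (c :: t) sub =
      if sub.isPrefixOf (c :: t) then 0
      else if PySem.Chars.find t sub = -1 then -1 else PySem.Chars.find t sub + 1 := by
  show PySem.Chars.find.go sub (c :: t) 0 = _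
  rw [PySem.Chars.find.go]
  by_cases h : sub.isPrefixOf (c :: t) = true
  · simp [h]
  · simp only [h]
    rw [find_go_shift]
    rfl

theorem find_nonneg (sub t : List Char) (h : PySem.Chars.find t sub ≠ -1) :
    0 ≤ PySem.Chars.find t sub := by
  rcases find_go_nonneg sub t 0 with h1 | h1
  · exact absurd h1 h
  · exact h1

theorem isIn_nil (sub : List Char) (hsub : sub ≠ []) :
    PySem.Chars.isIn sub [] = false := by
  simp [PySem.Chars.isIn, find_nil sub hsub]

theorem isIn_cons (sub : List Char) (c : Char) (t : List Char) :
    PySem.Chars.isIn sub (c :: t) = (sub.isPrefixOf (c :: t) || PySem.Chars.isIn sub t) := by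
  simp only [PySem.Chars.isIn]
  rw [find_cons]
  by_cases h : sub.isPrefixOf (c :: t) = true
  · simp [h]
  · simp only [h, Bool.false_or]
    by_cases h1 : PySem.Chars.find t sub = -1
    · simp [h1]
    · have := find_nonneg sub t h1
      simp only [h1, if_false]
      have h2 : PySem.Chars.find t sub + 1 ≠ -1 := by omega
      simp [bne, h1, h2]

theorem isIn_of_prefix (sub p : List Char) (hsub : sub ≠ []) (h : sub <+: p) :
    PySem.Chars.isIn sub p = true := by
  cases p with
  | nil =>
    rw [List.prefix_nil] at h
    exact absurd h hsub
  | cons c t =>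
    rw [isIn_cons]
    rw [(List.isPrefixOf_iff_prefix).mpr h]
    simp

theorem prefix_takeWhile_comma (sub : List Char) (hnc : (',' : Char) ∉ sub) :
    ∀ (l : List Char), sub <+: l → sub <+: l.takeWhile (· ≠ ',') := by
  induction sub with
  | nil => intro l _; exact List.nil_prefix
  | cons a s ih =>
    intro l h
    rcases h with ⟨r, rfl⟩
    have ha : a ≠ ',' := fun hc => hnc (hc ▸ List.mem_cons_self)
    have hs : (',' : Char) ∉ s := fun hc => hnc (List.mem_cons_of_mem _ hc)
    rw [List.cons_append, List.takeWhile_cons]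
    rw [if_pos (by simp [ha])]
    exact List.cons_prefix_cons.mpr ⟨rfl, ih hs (s ++ r) (List.prefix_append s r)⟩

theorem lowerChar_comma_iff (c : Char) : PySem.Chars.lowerChar c = ',' ↔ c = ',' := by
  unfold PySem.Chars.lowerChar PySem.Chars.isupper
  by_cases h : ('A' ≤ c ∧ c ≤ 'Z')
  · have h1 : 65 ≤ c.toNat ∧ c.toNat ≤ 90 := ⟨h.1, h.2⟩
    rw [if_pos (by simp [h.1, h.2])]
    constructor
    · intro he
      have h2 : (Char.ofNat (c.toNat + 32)).toNat = (',' : Char).toNat := by rw [he]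
      rw [Char.toNat_ofNat] at h2
      have hv : (c.toNat + 32).isValidChar := Or.inl (by omega)
      rw [if_pos hv] at h2
      have h3 : (',' : Char).toNat = 44 := by decide
      omega
    · intro he
      subst he
      exact absurd h1.1 (by decide)
  · have hb : (decide ('A' ≤ c) && decide (c ≤ 'Z')) = false := by
      rw [not_and_or] at h
      rcases h with h | h <;> simp [h]
    simp [hb]

theorem splitC_lower (l : List Char) :
    splitC (PySem.Chars.lower l) = (splitC l).map PySem.Chars.lower := by
  induction l with
  | nil => simp [splitC, PySem.Chars.lower]
  | cons c t ih =>
    rw [show PySem.Chars.lower (c :: t) = PySem.Chars.lowerChar c :: PySem.Chars.lower t from rfl]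
    rcases hX : splitC t with _ | ⟨h1, tl⟩
    · exact absurd hX (splitC_ne_nil t)
    by_cases hc : c = ','
    · subst hc
      rw [show PySem.Chars.lowerChar ',' = ',' from rfl,
          show splitC (',' :: PySem.Chars.lower t) = [] :: splitC (PySem.Chars.lower t) from by simp [splitC],
          show splitC (',' :: t) = [] :: splitC t from by simp [splitC], ih]
      rfl
    · have hlc : PySem.Chars.lowerChar c ≠ ',' := fun he => hc ((lowerChar_comma_iff c).mp he)
      have e1 : splitC (PySem.Chars.lowerChar c :: PySem.Chars.lower t)
          = (PySem.Chars.lowerChar c :: (splitC (PySem.Chars.lower t)).headI)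
              :: (splitC (PySem.Chars.lower t)).tail := by
        simp [splitC, hlc]
      rw [e1, ih, hX, show splitC (c :: t) = (c :: h1) :: tl from by simp [splitC, hc, hX]]
      rfl

theorem count_go_singleton (c : Char) (l : List Char) : ∀ (fuel acc : Nat),
    l.length ≤ fuel → PySem.Chars.count.go [c] fuel l acc = acc + l.count c := by
  induction l with
  | nil =>
    intro fuel acc _
    cases fuel with
    | zero => rw [PySem.Chars.count.go]; simp
    | succ f =>
      rw [PySem.Chars.count.go]
      · simp
      · omega
  | cons x t ih =>
    intro fuel acc hf
    cases fuel with
    | zero => simp at hf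
    | succ f =>
      rw [PySem.Chars.count.go]
      by_cases hx : c = x
      · subst hx
        rw [if_pos (by simp [List.isPrefixOf])]
        rw [show List.drop ([c].length) (c :: t) = t from rfl]
        rw [ih f (acc + 1) (by simp at hf ⊢; omega)]
        simp
        omega
      · rw [if_neg (by simp [List.isPrefixOf]; exact hx)]
        rw [ih f acc (by simp at hf ⊢; omega)]
        simp [List.count_cons]
        intro hh
        exact hx hh.symm

theorem count_singleton (l : List Char) (c : Char) :
    PySem.Chars.count l [c] = l.count c := by
  show (if ([c] : List Char).isEmpty = true then l.length + 1
      else PySem.Chars.count.go [c] l.length l 0) = l.count c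
  rw [if_neg (by simp)]
  rw [count_go_singleton c l l.length 0 le_rfl]
  simp

theorem splitC_head_prefix (t h1 : List Char) (tl : List (List Char))
    (hX : splitC t = h1 :: tl) : h1 <+: t := by
  have hh := headI_splitC t
  rw [hX] at hh
  simp only [List.headI] at hh
  rw [hh]
  exact List.takeWhile_prefix _

theorem prefix_head_false (sub : List Char) (c : Char) (t h1 : List Char)
    (tl : List (List Char)) (hX : splitC t = h1 :: tl)
    (hp : ¬ sub.isPrefixOf (c :: t) = true) : sub.isPrefixOf (c :: h1) = false := by
  rw [Bool.eq_false_iff]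
  intro hcon
  have hx2 : sub <+: c :: h1 := List.isPrefixOf_iff_prefix.mp hcon
  have hh1t : h1 <+: t := splitC_head_prefix t h1 tl hX
  exact hp (List.isPrefixOf_iff_prefix.mpr
    (hx2.trans (List.cons_prefix_cons.mpr ⟨rfl, hh1t⟩)))

theorem crux_none (sub : List Char) (hsub : sub ≠ []) (_hnc : (',' : Char) ∉ sub)
    (t : List Char) (h : PySem.Chars.find t sub = -1) :
    ∀ p ∈ splitC t, PySem.Chars.isIn sub p = false := by
  induction t with
  | nil =>
    intro p hp
    simp only [splitC, List.mem_singleton] at hp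
    subst hp
    exact isIn_nil sub hsub
  | cons c t ih =>
    rw [find_cons] at h
    by_cases hp : sub.isPrefixOf (c :: t) = true
    · rw [if_pos hp] at h
      simp at h
    · rw [if_neg hp] at h
      have ht : PySem.Chars.find t sub = -1 := by
        by_cases h1 : PySem.Chars.find t sub = -1
        · exact h1
        · rw [if_neg h1] at h
          have := find_nonneg sub t h1
          omega
      intro p hpmem
      rcases hX : splitC t with _ | ⟨h1, tl⟩
      · exact absurd hX (splitC_ne_nil t)
      by_cases hc : c = ','
      · subst hc
        rw [show splitC (',' :: t) = [] :: splitC t from by simp [splitC]] at hpmem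
        rcases List.mem_cons.mp hpmem with rfl | hpm
        · exact isIn_nil sub hsub
        · exact ih ht p hpm
      · rw [show splitC (c :: t) = (c :: h1) :: tl from by simp [splitC, hc, hX]] at hpmem
        rcases List.mem_cons.mp hpmem with rfl | hpm
        · rw [isIn_cons]
          have hh1 : PySem.Chars.isIn sub h1 = false :=
            ih ht h1 (by rw [hX]; exact List.mem_cons_self)
          rw [prefix_head_false sub c t h1 tl hX hp, hh1]
          rfl
        · exact ih ht p (by rw [hX]; exact List.mem_cons_of_mem _ hpm)

theorem crux_some (sub : List Char) (hsub : sub ≠ []) (hnc : (',' : Char) ∉ sub)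
    (t : List Char) (h : PySem.Chars.find t sub ≠ -1) :
    (t.take (PySem.Chars.find t sub).toNat).count ',' < (splitC t).length ∧
    (∀ i, i < (t.take (PySem.Chars.find t sub).toNat).count ',' →
      PySem.Chars.isIn sub ((splitC t).getD i []) = false) ∧
    PySem.Chars.isIn sub ((splitC t).getD ((t.take (PySem.Chars.find t sub).toNat).count ',') []) = true := by
  induction t with
  | nil => exact absurd (find_nil sub hsub) h
  | cons c t ih =>
    rw [find_cons] at h ⊢
    by_cases hp : sub.isPrefixOf (c :: t) = true
    · rw [if_pos hp] at h ⊢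
      simp only [Int.toNat_zero, List.take_zero, List.count_nil]
      refine ⟨by rw [length_splitC]; omega, fun i hi => absurd hi (by omega), ?_⟩
      rcases hX : splitC (c :: t) with _ | ⟨g, gl⟩
      · exact absurd hX (splitC_ne_nil _)
      have hg : g = (c :: t).takeWhile (· ≠ ',') := by
        have hh := headI_splitC (c :: t)
        rw [hX] at hh
        exact hh
      rw [show ((g :: gl).getD 0 []) = g from rfl]
      apply isIn_of_prefix sub g hsub
      rw [hg]
      exact prefix_takeWhile_comma sub hnc _ (List.isPrefixOf_iff_prefix.mp hp)
    · rw [if_neg hp] at h ⊢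
      have hft : PySem.Chars.find t sub ≠ -1 := by
        intro h1
        rw [if_pos h1] at h
        exact h rfl
      rw [if_neg hft] at h ⊢
      obtain ⟨ih1, ih2, ih3⟩ := ih hft
      have hj0 : 0 ≤ PySem.Chars.find t sub := find_nonneg sub t hft
      have htn : (PySem.Chars.find t sub + 1).toNat = (PySem.Chars.find t sub).toNat + 1 := by
        omega
      rw [htn, List.take_succ_cons]
      rcases hX : splitC t with _ | ⟨h1, tl⟩
      · exact absurd hX (splitC_ne_nil t)
      rw [hX] at ih1 ih2 ih3
      by_cases hc : c = ','
      · subst hc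
        rw [show splitC (',' :: t) = [] :: splitC t from by simp [splitC], hX]
        rw [List.count_cons_self]
        refine ⟨by simpa using ih1, ?_, ?_⟩
        · intro i hi
          cases i with
          | zero => rw [List.getD_cons_zero]; exact isIn_nil sub hsub
          | succ i' =>
            rw [List.getD_cons_succ]
            exact ih2 i' (by omega)
        · rw [List.getD_cons_succ]
          exact ih3
      · rw [show splitC (c :: t) = (c :: h1) :: tl from by simp [splitC, hc, hX]]
        rw [show List.count ',' (c :: List.take (PySem.Chars.find t sub).toNat t)
              = List.count ',' (List.take (PySem.Chars.find t sub).toNat t) from by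
          simp [hc]]
        refine ⟨by simpa using ih1, ?_, ?_⟩
        · intro i hi
          cases i with
          | zero =>
            rw [List.getD_cons_zero]
            rw [isIn_cons]
            have hh1 : PySem.Chars.isIn sub h1 = false := by
              have := ih2 0 hi
              rwa [List.getD_cons_zero] at this
            rw [prefix_head_false sub c t h1 tl hX hp, hh1]
            rfl
          | succ i' =>
            rw [List.getD_cons_succ]
            have := ih2 (i' + 1) hi
            rwa [List.getD_cons_succ] at this
        · rcases hk : List.count ',' (List.take (PySem.Chars.find t sub).toNat t) with _ | m
          · rw [hk] at ih3
            rw [List.getD_cons_zero] at ih3 ⊢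
            rw [isIn_cons, ih3]
            simp
          · rw [hk] at ih3
            rw [List.getD_cons_succ] at ih3 ⊢
            exact ih3

theorem find?_of_first {α : Type} (p : α → Bool) (d : α) :
    ∀ (ws : List α) (k : Nat), k < ws.length →
    (∀ i, i < k → p (ws.getD i d) = false) → p (ws.getD k d) = true →
    ws.find? p = some (ws.getD k d) := by
  intro ws
  induction ws with
  | nil => intro k hk; simp at hk
  | cons w ws ih =>
    intro k hk hlt hp
    cases k with
    | zero =>
      rw [List.getD_cons_zero] at hp ⊢
      rw [List.find?_cons_of_pos hp]
    | succ m =>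
      have h0 : p w = false := by
        have := hlt 0 (Nat.succ_pos m)
        rwa [List.getD_cons_zero] at this
      rw [List.getD_cons_succ]
      rw [List.find?_cons_of_neg (by simp [h0])]
      exact ih m (by simpa using hk)
        (fun i hi => by
          have := hlt (i + 1) (by omega)
          rwa [List.getD_cons_succ] at this)
        (by rwa [List.getD_cons_succ] at hp)

theorem streetFind_eq (ws : List String) :
    streetFind ws = ws.find? (fun w => PySem.Chars.isIn "street".toList (PySem.Chars.lower w.toList)) := by
  induction ws with
  | nil => rfl
  | cons w ws ih =>
    rw [streetFind]
    have hEq : PySem.Str.find (PySem.Str.lower w) "street"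
        = PySem.Chars.find (PySem.Chars.lower w.toList) "street".toList := by
      simp [PySem.Str.find, PySem.Str.lower]
    by_cases hne : PySem.Chars.find (PySem.Chars.lower w.toList) "street".toList = -1
    · have hpred : PySem.Chars.isIn "street".toList (PySem.Chars.lower w.toList) = false := by
        simp only [PySem.Chars.isIn]
        rw [hne]
        decide
      rw [if_neg (by rw [hEq, hne]; simp)]
      rw [List.find?_cons_of_neg
        (p := fun v : String => PySem.Chars.isIn "street".toList (PySem.Chars.lower v.toList))
        (by show ¬ PySem.Chars.isIn "street".toList (PySem.Chars.lower w.toList) = true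
            rw [hpred]
            decide)]
      exact ih
    · have hpred : PySem.Chars.isIn "street".toList (PySem.Chars.lower w.toList) = true := by
        simp only [PySem.Chars.isIn]
        rw [bne_iff_ne]
        exact hne
      rw [if_pos (by rw [hEq]; exact hne)]
      exact (List.find?_cons_of_pos
        (p := fun v : String => PySem.Chars.isIn "street".toList (PySem.Chars.lower v.toList))
        hpred).symm

theorem roadFind_eq (ws : List String) :
    roadFind ws = ws.find? (fun w => PySem.Chars.isIn "road".toList (PySem.Chars.lower w.toList)) := by
  induction ws with
  | nil => rfl
  | cons w ws ih =>
    rw [roadFind]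
    have hEq : PySem.Str.find (PySem.Str.lower w) "road"
        = PySem.Chars.find (PySem.Chars.lower w.toList) "road".toList := by
      simp [PySem.Str.find, PySem.Str.lower]
    by_cases hne : PySem.Chars.find (PySem.Chars.lower w.toList) "road".toList = -1
    · have hpred : PySem.Chars.isIn "road".toList (PySem.Chars.lower w.toList) = false := by
        simp only [PySem.Chars.isIn]
        rw [hne]
        decide
      rw [if_neg (by rw [hEq, hne]; simp)]
      rw [List.find?_cons_of_neg
        (p := fun v : String => PySem.Chars.isIn "road".toList (PySem.Chars.lower v.toList))
        (by show ¬ PySem.Chars.isIn "road".toList (PySem.Chars.lower w.toList) = true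
            rw [hpred]
            decide)]
      exact ih
    · have hpred : PySem.Chars.isIn "road".toList (PySem.Chars.lower w.toList) = true := by
        simp only [PySem.Chars.isIn]
        rw [bne_iff_ne]
        exact hne
      rw [if_pos (by rw [hEq]; exact hne)]
      exact (List.find?_cons_of_pos
        (p := fun v : String => PySem.Chars.isIn "road".toList (PySem.Chars.lower v.toList))
        hpred).symm

-- the heart: A's first-matching-chunk scan equals B's find-then-count-commas lookup
theorem chunk_find (sub : List Char) (hsub : sub ≠ []) (hnc : (',' : Char) ∉ sub)
    (cs : List Char) :
    ((splitC cs).map String.ofList).find?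
        (fun w => PySem.Chars.isIn sub (PySem.Chars.lower w.toList)) =
      (if PySem.Chars.find (PySem.Chars.lower cs) sub = -1 then none
       else some (PySem.List.pyGetD ((splitC cs).map String.ofList)
          ((((PySem.Chars.lower cs).take (PySem.Chars.find (PySem.Chars.lower cs) sub).toNat).count ',' : Nat) : Int) "")) := by
  by_cases hf : PySem.Chars.find (PySem.Chars.lower cs) sub = -1
  · rw [if_pos hf]
    rw [List.find?_eq_none]
    intro w hw
    rcases List.mem_map.mp hw with ⟨p, hpmem, rfl⟩
    rw [String.toList_ofList]
    have hlp : PySem.Chars.lower p ∈ splitC (PySem.Chars.lower cs) := by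
      rw [splitC_lower]
      exact List.mem_map_of_mem hpmem
    have hno := crux_none sub hsub hnc (PySem.Chars.lower cs) hf _ hlp
    simp [hno]
  · rw [if_neg hf]
    obtain ⟨hk1, hk2, hk3⟩ := crux_some sub hsub hnc (PySem.Chars.lower cs) hf
    have hlen : (splitC (PySem.Chars.lower cs)).length = (splitC cs).length := by
      rw [splitC_lower, List.length_map]
    have hlen2 : (((PySem.Chars.lower cs).take
          (PySem.Chars.find (PySem.Chars.lower cs) sub).toNat).count ',')
        < ((splitC cs).map String.ofList).length := by
      rw [List.length_map]
      omega
    have hgetD : ∀ i, i < (splitC cs).length →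
        PySem.Chars.isIn sub (PySem.Chars.lower ((((splitC cs).map String.ofList).getD i "").toList))
          = PySem.Chars.isIn sub ((splitC (PySem.Chars.lower cs)).getD i []) := by
      intro i hi
      rw [List.getD_eq_getElem _ _ (by simpa using hi), List.getElem_map,
        String.toList_ofList, splitC_lower,
        List.getD_eq_getElem _ _ (by simpa using hi), List.getElem_map]
    rw [find?_of_first (fun w => PySem.Chars.isIn sub (PySem.Chars.lower w.toList)) ""
      ((splitC cs).map String.ofList)
      (((PySem.Chars.lower cs).take (PySem.Chars.find (PySem.Chars.lower cs) sub).toNat).count ',')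
      hlen2
      (fun i hi => by
        show PySem.Chars.isIn sub (PySem.Chars.lower
          (((splitC cs).map String.ofList).getD i "").toList) = false
        rw [hgetD i (by omega)]
        exact hk2 i hi)
      (by
        show PySem.Chars.isIn sub (PySem.Chars.lower
          (((splitC cs).map String.ofList).getD
            (((PySem.Chars.lower cs).take
              (PySem.Chars.find (PySem.Chars.lower cs) sub).toNat).count ',') "").toList) = true
        rw [hgetD _ (by omega)]
        exact hk3)]
    rw [PySem.List.pyGetD_natCast]

theorem chars_join_nil_flatten (l : List (List Char)) :
    PySem.Chars.join [] l = l.flatten := by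
  induction l with
  | nil => exact PySem.Chars.join_nil []
  | cons p l ih =>
      cases l with
      | nil => simp [PySem.Chars.join_singleton]
      | cons q rest =>
          rw [PySem.Chars.join_cons_cons]
          simp only [List.flatten_cons, List.append_nil]
          rw [ih]
          simp

theorem foldl_append_toList (ws : List String) (acc : String) :
    (ws.foldl (fun acc w => acc ++ w) acc).toList
      = acc.toList ++ (ws.map String.toList).flatten := by
  induction ws generalizing acc with
  | nil => simp
  | cons w ws ih =>
      rw [List.foldl_cons, ih]
      simp [String.toList_append]

theorem join_empty_eq_foldl (ws : List String) :
    PySem.Str.join "" ws = ws.foldl (fun acc w => acc ++ w) "" := by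
  apply String.toList_inj.mp
  rw [PySem.Str.toList_join, foldl_append_toList]
  rw [show ("" : String).toList = [] from rfl, chars_join_nil_flatten]
  simp

theorem words_eq (address : String) :
    ((PySem.Str.split? address ",").getD []) = (splitC address.toList).map String.ofList := by
  simp only [PySem.Str.split?, PySem.Chars.split?]
  rw [show (("," : String).toList) = [','] from rfl]
  rw [if_neg (by simp)]
  simp [splitOn_comma]

-- ===== VERDICT (by name: the statement is the Claim_ definition above) =====
theorem address_split_spec : Claim_equal_address_split := by
  intro address _ _
  unfold Spec_address_split address_split address_split_alt
  simp only
  rw [words_eq, join_empty_eq_foldl]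
  have hfs : PySem.Str.find (PySem.Str.lower address) "street"
      = PySem.Chars.find (PySem.Chars.lower address.toList) "street".toList := by
    simp [PySem.Str.find, PySem.Str.lower]
  have hfr : PySem.Str.find (PySem.Str.lower address) "road"
      = PySem.Chars.find (PySem.Chars.lower address.toList) "road".toList := by
    simp [PySem.Str.find, PySem.Str.lower]
  have hcount : ∀ j : Int, 0 ≤ j →
      (PySem.Str.count (PySem.Str.slice (PySem.Str.lower address) none (some j)) ",")
        = ((PySem.Chars.lower address.toList).take j.toNat).count ',' := by
    intro j hj
    show PySem.Chars.count (PySem.Str.slice (PySem.Str.lower address) none (some j)).toList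
        (("," : String).toList) = _
    rw [show (("," : String).toList) = [','] from rfl, count_singleton]
    show (String.ofList (PySem.Chars.slice (PySem.Str.lower address).toList none (some j))).toList.count ',' = _
    rw [String.toList_ofList, PySem.Str.toList_lower]
    rw [show PySem.Chars.slice (PySem.Chars.lower address.toList) none (some j)
          = PySem.List.slice (PySem.Chars.lower address.toList) none (some j) from rfl]
    rw [PySem.List.slice_to _ hj]
  rw [streetFind_eq, roadFind_eq,
    chunk_find "street".toList (by decide) (by decide) address.toList,
    chunk_find "road".toList (by decide) (by decide) address.toList,
    hfs, hfr]
  by_cases hs : PySem.Chars.find (PySem.Chars.lower address.toList) "street".toList = -1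
  · rw [if_pos hs, if_pos hs]
    by_cases hr : PySem.Chars.find (PySem.Chars.lower address.toList) "road".toList = -1
    · rw [if_pos hr, if_pos hr]
      cases PySem.List.pyGet? ((splitC address.toList).map String.ofList) (-2) <;>
        cases PySem.List.pyGet? ((splitC address.toList).map String.ofList) (-1) <;> rfl
    · rw [if_neg hr, if_neg hr]
      rw [hcount _ (find_nonneg _ _ hr)]
      cases PySem.List.pyGet? ((splitC address.toList).map String.ofList) (-2) <;>
        cases PySem.List.pyGet? ((splitC address.toList).map String.ofList) (-1) <;> rfl
  · rw [if_neg hs, if_neg hs]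
    rw [if_neg hs]
    rw [hcount _ (find_nonneg _ _ hs)]
    cases PySem.List.pyGet? ((splitC address.toList).map String.ofList) (-2) <;>
      cases PySem.List.pyGet? ((splitC address.toList).map String.ofList) (-1) <;> rfl
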